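-- pv_equiv track=rewrite | github.com/kseenyoung/programmers | level1/숫자 짝꿍.py | solution
-- ===== SOURCE A (Python) =====
-- from collections import Counter
--
-- def solution(X, Y):
--     counteX = Counter(X)
--     counteY = Counter(Y)
--     result = ''
--     for x in reversed(sorted(counteX)):
--         if x in counteY:
--             result += x*min(counteX[x], counteY[x])
--     return '-1' if result == '' else '0' if len(result) == result.count('0') else result
-- ===== SOURCE B (Python) =====
-- def solution(X, Y):
--     xs = sorted(X)
--     ys = sorted(Y)
--     i = j = 0
--     common = []
--     while i < len(xs) and j < len(ys):
--         if xs[i] == ys[j]: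
--             common.append(xs[i])
--             i += 1
--             j += 1
--         elif xs[i] < ys[j]:
--             i += 1
--         else:
--             j += 1
--     if not common:
--         return '-1'
--     if all(c == '0' for c in common):
--         return '0'
--     return ''.join(reversed(common))
-- ===== Notes on version B (the rewrite author's own statement) =====
-- stated objective: alternative
-- what changed: Replaces the two Counters plus descending per-key loop with sorting both strings and a two-pointer walk that extracts the multiset intersection in ascending order, then reverses it; the '-1'/'0' branching is kept.
import Mathlib
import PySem

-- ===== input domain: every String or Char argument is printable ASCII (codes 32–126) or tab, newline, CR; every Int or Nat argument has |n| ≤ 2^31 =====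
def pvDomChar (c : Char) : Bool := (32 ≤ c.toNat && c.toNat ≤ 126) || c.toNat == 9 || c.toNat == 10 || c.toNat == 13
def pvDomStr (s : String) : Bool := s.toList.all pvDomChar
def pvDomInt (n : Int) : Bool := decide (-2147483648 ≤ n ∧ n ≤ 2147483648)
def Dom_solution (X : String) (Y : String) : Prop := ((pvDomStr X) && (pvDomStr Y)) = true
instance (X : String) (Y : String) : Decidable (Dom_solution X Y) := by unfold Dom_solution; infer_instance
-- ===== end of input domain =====

-- B replaces A's two Counters and per-key descending loop by sorting both strings and
-- extracting the multiset intersection with a two-pointer walk (alternative decomposition, same cost).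

-- ===== PORT A =====
def solution (X : String) (Y : String) : String :=
  let counteX := PySem.Dict.counter X.toList
  let counteY := PySem.Dict.counter Y.toList
  let result := ((PySem.List.sorted counteX.keys (fun x => x) false).reverse).foldl
    (fun result x =>
      if counteY.contains x then
        result ++ List.replicate (min (counteX.getD x 0) (counteY.getD x 0)).toNat x
      else result) ([] : List Char)
  if result = [] then "-1"
  else if result.length = result.count '0' then "0"
  else String.ofList result

-- ===== PORT B =====
-- the two-pointer while loop of Source B, as recursion on the pair of unread suffixes
def twoPtr : List Char → List Char → List Char
  | [], _ => []
  | _ :: _, [] => []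
  | x :: xs, y :: ys =>
    if x = y then x :: twoPtr xs ys
    else if x < y then twoPtr xs (y :: ys)
    else twoPtr (x :: xs) ys
termination_by xs ys => xs.length + ys.length

def solution_alt (X : String) (Y : String) : String :=
  let xs := PySem.List.sorted X.toList (fun c => c) false
  let ys := PySem.List.sorted Y.toList (fun c => c) false
  let common := twoPtr xs ys
  if common = [] then "-1"
  else if common.all (fun c => c == '0') then "0"
  else String.ofList common.reverse

-- ===== PRECONDITION & SPEC =====
def Spec_solution (X : String) (Y : String) (out : String) : Prop := out = solution_alt X Y
instance (X : String) (Y : String) (out : String) : Decidable (Spec_solution X Y out) := by unfold Spec_solution; infer_instance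

-- ===== CLAIM (what is proved, stated in full; the proofs are below) =====
def Claim_equal_solution : Prop := ∀ (X : String) (Y : String), Dom_solution X Y → Spec_solution X Y (solution X Y)

-- ===== LEMMAS AND PROOFS =====

-- every element of the two-pointer intersection comes from the left list
theorem mem_twoPtr_left {xs ys : List Char} {c : Char} (h : c ∈ twoPtr xs ys) : c ∈ xs := by
  induction xs, ys using twoPtr.induct with
  | case1 => simp [twoPtr] at h
  | case2 => simp [twoPtr] at h
  | case3 xs y ys ih =>
    rw [twoPtr, if_pos rfl] at h
    rcases List.mem_cons.mp h with h | h
    · simp [h]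
    · exact List.mem_cons_of_mem _ (ih h)
  | case4 x xs y ys hne hlt ih =>
    rw [twoPtr, if_neg hne, if_pos hlt] at h
    exact List.mem_cons_of_mem _ (ih h)
  | case5 x xs y ys hne hlt ih =>
    rw [twoPtr, if_neg hne, if_neg hlt] at h
    exact ih h

-- on sorted inputs the two-pointer output is sorted
theorem pairwise_twoPtr {xs ys : List Char}
    (hx : xs.Pairwise (· ≤ ·)) (hy : ys.Pairwise (· ≤ ·)) :
    (twoPtr xs ys).Pairwise (· ≤ ·) := by
  induction xs, ys using twoPtr.induct with
  | case1 => simp [twoPtr]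
  | case2 => simp [twoPtr]
  | case3 xs y ys ih =>
    rw [twoPtr, if_pos rfl]
    refine List.pairwise_cons.mpr ⟨?_, ih hx.of_cons hy.of_cons⟩
    intro c hc
    exact List.rel_of_pairwise_cons hx (mem_twoPtr_left hc)
  | case4 x xs y ys hne hlt ih =>
    rw [twoPtr, if_neg hne, if_pos hlt]
    exact ih hx.of_cons hy
  | case5 x xs y ys hne hlt ih =>
    rw [twoPtr, if_neg hne, if_neg hlt]
    exact ih hx hy.of_cons

-- on sorted inputs the two-pointer output carries the min-multiplicity of every char
theorem count_twoPtr {xs ys : List Char}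
    (hx : xs.Pairwise (· ≤ ·)) (hy : ys.Pairwise (· ≤ ·)) (c : Char) :
    (twoPtr xs ys).count c = min (xs.count c) (ys.count c) := by
  induction xs, ys using twoPtr.induct with
  | case1 => simp [twoPtr]
  | case2 => simp [twoPtr]
  | case3 xs y ys ih =>
    rw [twoPtr, if_pos rfl]
    by_cases hc : c = y
    · subst hc
      simp only [List.count_cons_self, ih hx.of_cons hy.of_cons]
      omega
    · simp only [List.count_cons_of_ne (Ne.symm hc), ih hx.of_cons hy.of_cons]
  | case4 x xs y ys hne hlt ih =>
    rw [twoPtr, if_neg hne, if_pos hlt, ih hx.of_cons hy]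
    by_cases hc : c = x
    · subst hc
      have hny : (y :: ys).count c = 0 := by
        refine List.count_eq_zero.mpr ?_
        intro hmem
        rcases List.mem_cons.mp hmem with h | h
        · exact absurd hlt (h ▸ lt_irrefl y)
        · exact lt_irrefl c (lt_of_lt_of_le hlt (List.rel_of_pairwise_cons hy h))
      rw [hny]; omega
    · rw [List.count_cons_of_ne (Ne.symm hc)]
  | case5 x xs y ys hne hlt ih =>
    rw [twoPtr, if_neg hne, if_neg hlt, ih hx hy.of_cons]
    have hyx : y < x := lt_of_le_of_ne (not_lt.mp hlt) (fun h => hne h.symm)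
    by_cases hc : c = y
    · subst hc
      have hnx : (x :: xs).count c = 0 := by
        refine List.count_eq_zero.mpr ?_
        intro hmem
        rcases List.mem_cons.mp hmem with h | h
        · exact lt_irrefl c (h ▸ hyx)
        · exact lt_irrefl c (lt_of_lt_of_le hyx (List.rel_of_pairwise_cons hx h))
      rw [hnx]; omega
    · rw [List.count_cons_of_ne (Ne.symm hc)]

-- canonical form: ascending blocks of min-multiplicity over the distinct chars of Xl
def canon (Xl Yl : List Char) : List Char :=
  (PySem.List.sorted (PySem.Set.ofList Xl) (fun x => x) false).flatMap
    (fun c => List.replicate (min (Xl.count c) (Yl.count c)) c)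

theorem pairwise_flatMap_replicate (K : List Char) (n : Char → Nat)
    (hK : K.Pairwise (· < ·)) :
    (K.flatMap (fun c => List.replicate (n c) c)).Pairwise (· ≤ ·) := by
  induction K with
  | nil => simp
  | cons k K ih =>
    rw [List.flatMap_cons]
    refine List.pairwise_append.mpr ⟨?_, ih hK.of_cons, ?_⟩
    · exact List.pairwise_replicate.mpr (Or.inr (le_refl k))
    · intro a ha b hb
      rcases List.mem_flatMap.mp hb with ⟨c, hcK, hbc⟩
      rw [List.eq_of_mem_replicate ha, List.eq_of_mem_replicate hbc]
      exact (List.rel_of_pairwise_cons hK hcK).le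

theorem count_flatMap_replicate (K : List Char) (n : Char → Nat) (hK : K.Nodup) (c : Char) :
    (K.flatMap (fun d => List.replicate (n d) d)).count c = if c ∈ K then n c else 0 := by
  induction K with
  | nil => simp
  | cons k K ih =>
    rw [List.flatMap_cons, List.count_append, List.count_replicate,
        ih (List.nodup_cons.mp hK).2]
    by_cases hc : c = k
    · subst hc
      have : c ∉ K := (List.nodup_cons.mp hK).1
      simp [this]
    · simp [hc, Ne.symm hc]

theorem pairwise_canon (Xl Yl : List Char) : (canon Xl Yl).Pairwise (· ≤ ·) :=
  pairwise_flatMap_replicate _ _ (PySem.List.sorted_ofList_pairwise_lt Xl)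

theorem count_canon (Xl Yl : List Char) (c : Char) :
    (canon Xl Yl).count c = min (Xl.count c) (Yl.count c) := by
  unfold canon
  rw [count_flatMap_replicate _ _ ((PySem.List.sorted_ofList_pairwise_lt Xl).imp ne_of_lt)]
  by_cases hmem : c ∈ Xl
  · rw [if_pos (by
      rw [PySem.List.mem_sorted]
      exact (PySem.Set.mem_ofList _ _).mpr hmem)]
  · rw [if_neg (by
      rw [PySem.List.mem_sorted]
      exact fun h => hmem ((PySem.Set.mem_ofList _ _).mp h)),
      List.count_eq_zero.mpr hmem]
    omega

-- B's common list is the canonical form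
theorem twoPtr_sorted_eq_canon (Xl Yl : List Char) :
    twoPtr (PySem.List.sorted Xl (fun c => c) false) (PySem.List.sorted Yl (fun c => c) false)
      = canon Xl Yl := by
  have hx : (PySem.List.sorted Xl (fun c => c) false).Pairwise (· ≤ ·) :=
    PySem.List.sorted_pairwise Xl (fun c => c)
  have hy : (PySem.List.sorted Yl (fun c => c) false).Pairwise (· ≤ ·) :=
    PySem.List.sorted_pairwise Yl (fun c => c)
  refine List.Perm.eq_of_pairwise (fun a b _ _ h1 h2 => le_antisymm h1 h2)
    (pairwise_twoPtr hx hy) (pairwise_canon Xl Yl) ?_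
  refine List.perm_iff_count.mpr fun c => ?_
  rw [count_twoPtr hx hy c, count_canon,
      (PySem.List.sorted_perm Xl (fun c => c) false).count_eq,
      (PySem.List.sorted_perm Yl (fun c => c) false).count_eq]

-- A's accumulated result is the reverse of the canonical form
theorem result_A_eq (Xl Yl : List Char) :
    ((PySem.List.sorted (PySem.Dict.counter Xl).keys (fun x => x) false).reverse).foldl
      (fun result x =>
        if (PySem.Dict.counter Yl).contains x then
          result ++ List.replicate (min ((PySem.Dict.counter Xl).getD x 0)
                                        ((PySem.Dict.counter Yl).getD x 0)).toNat x
        else result) ([] : List Char) = (canon Xl Yl).reverse := by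
  rw [PySem.Dict.keys_counter]
  have hbody : ∀ (acc : List Char) (x : Char),
      x ∈ (PySem.List.sorted (PySem.Set.ofList Xl) (fun x => x) false).reverse →
      (if (PySem.Dict.counter Yl).contains x = true then
        acc ++ List.replicate (min ((PySem.Dict.counter Xl).getD x 0)
                                   ((PySem.Dict.counter Yl).getD x 0)).toNat x
      else acc) = acc ++ List.replicate (min (Xl.count x) (Yl.count x)) x := by
    intro acc x _
    rw [PySem.Dict.contains_counter, PySem.Dict.getD_counter, PySem.Dict.getD_counter]
    by_cases hY : x ∈ Yl
    · rw [if_pos (by simpa using hY)]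
      congr 1
      congr 1
      omega
    · rw [if_neg (by simpa using hY), List.count_eq_zero.mpr hY]
      simp
  have hfold := PySem.List.foldl_congr_mem (init := ([] : List Char)) (h := hbody)
  rw [hfold, PySem.List.foldl_append_eq_flatMap, List.nil_append]
  unfold canon
  rw [List.reverse_flatMap]
  have hfn : (List.reverse ∘ fun c => List.replicate (min (Xl.count c) (Yl.count c)) c)
      = fun c => List.replicate (min (Xl.count c) (Yl.count c)) c := by
    funext c
    simp [Function.comp, List.reverse_replicate]
  rw [hfn]

-- ===== VERDICT (by name: the statement is the Claim_ definition above) =====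
theorem solution_spec : Claim_equal_solution := by
  intro X Y _
  unfold Spec_solution solution solution_alt
  simp only []
  rw [result_A_eq X.toList Y.toList, twoPtr_sorted_eq_canon X.toList Y.toList]
  generalize canon X.toList Y.toList = C
  have hcnt : (C.reverse.length = C.reverse.count '0') ↔ (C.all (fun c => c == '0') = true) := by
    rw [List.length_reverse, List.count_reverse, List.all_eq_true]
    constructor
    · intro h c hc
      exact beq_iff_eq.mpr ((List.count_eq_length (a := '0') (l := C)).mp h.symm c hc).symm
    · intro h
      refine ((List.count_eq_length (a := '0') (l := C)).mpr ?_).symm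
      intro b hb
      exact (beq_iff_eq.mp (h b hb)).symm
  by_cases h0 : C = []
  · rw [if_pos (by rw [h0, List.reverse_nil]), if_pos h0]
  · rw [if_neg (fun h => h0 (List.reverse_eq_nil_iff.mp h)), if_neg h0]
    by_cases hz : C.all (fun c => c == '0') = true
    · rw [if_pos (hcnt.mpr hz), if_pos hz]
    · rw [if_neg (fun h => hz (hcnt.mp h)), if_neg hz]
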